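-- pv_equiv track=rewrite | github.com/jjoshua2/DeepFin | tests/test_cboard_move_parity.py | _spec_plane_for_delta
-- ===== SOURCE A (Python) =====
-- QUEEN_DIRS = (
--     (0, 1),
--     (1, 1),
--     (1, 0),
--     (1, -1),
--     (0, -1),
--     (-1, -1),
--     (-1, 0),
--     (-1, 1),
-- )
--
-- KNIGHT_DELTAS = (
--     (1, 2),
--     (2, 1),
--     (2, -1),
--     (1, -2),
--     (-1, -2),
--     (-2, -1),
--     (-2, 1),
--     (-1, 2),
-- )
--
-- def _spec_plane_for_delta(df: int, dr: int) -> int: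
--     plane = 0
--     for dir_file, dir_rank in QUEEN_DIRS:
--         for dist in range(1, 8):
--             if df == dir_file * dist and dr == dir_rank * dist:
--                 return plane
--             plane += 1
--     for offset, (dir_file, dir_rank) in enumerate(KNIGHT_DELTAS):
--         if df == dir_file and dr == dir_rank:
--             return 56 + offset
--     raise AssertionError(f"unencodable delta df={df} dr={dr}")
-- ===== SOURCE B (Python) =====
-- QUEEN_DIRS = (
--     (0, 1),
--     (1, 1),
--     (1, 0),
--     (1, -1),
--     (0, -1),
--     (-1, -1),
--     (-1, 0),
--     (-1, 1),
-- )
--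
-- KNIGHT_DELTAS = (
--     (1, 2),
--     (2, 1),
--     (2, -1),
--     (1, -2),
--     (-1, -2),
--     (-2, -1),
--     (-2, 1),
--     (-1, 2),
-- )
--
-- _QUEEN_DIR_INDEX = {d: i for i, d in enumerate(QUEEN_DIRS)}
-- _KNIGHT_INDEX = {d: i for i, d in enumerate(KNIGHT_DELTAS)}
--
--
-- def _spec_plane_for_delta(df: int, dr: int) -> int:
--     sx = (df > 0) - (df < 0)
--     sy = (dr > 0) - (dr < 0)
--     dist = max(abs(df), abs(dr))
--     qi = _QUEEN_DIR_INDEX.get((sx, sy))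
--     if qi is not None and 1 <= dist <= 7 and df == sx * dist and dr == sy * dist:
--         return qi * 7 + (dist - 1)
--     ki = _KNIGHT_INDEX.get((df, dr))
--     if ki is not None:
--         return 56 + ki
--     raise AssertionError(f"unencodable delta df={df} dr={dr}")
-- ===== Notes on version B (the rewrite author's own statement) =====
-- stated objective: simpler
-- what changed: Replaces the nested 8x7 scan over queen directions by O(1) sign/abs arithmetic (unit direction + distance, index computed by formula) and the knight scan by a precomputed dict lookup.
import Mathlib
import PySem

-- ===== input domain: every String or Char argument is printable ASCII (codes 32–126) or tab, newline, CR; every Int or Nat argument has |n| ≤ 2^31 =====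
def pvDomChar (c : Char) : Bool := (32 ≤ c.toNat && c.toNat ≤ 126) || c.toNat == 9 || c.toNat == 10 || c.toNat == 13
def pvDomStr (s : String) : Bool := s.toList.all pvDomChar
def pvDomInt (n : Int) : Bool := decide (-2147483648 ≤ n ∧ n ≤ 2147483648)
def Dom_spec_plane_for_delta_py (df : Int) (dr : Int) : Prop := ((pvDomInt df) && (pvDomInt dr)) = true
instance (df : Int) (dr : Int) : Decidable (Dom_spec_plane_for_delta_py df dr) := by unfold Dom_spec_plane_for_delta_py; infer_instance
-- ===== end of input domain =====

-- B replaces A's nested 8×7 queen-direction scan by O(1) sign/abs arithmetic and the knight scan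
-- by a precomputed index (objective: simpler).  Return-value equivalence only; where A raises
-- AssertionError, B raises it too (those inputs are outside Pre_).

-- ===== PORT A =====
def pvQueenDirs : List (Int × Int) :=
  [(0, 1), (1, 1), (1, 0), (1, -1), (0, -1), (-1, -1), (-1, 0), (-1, 1)]

def pvKnightDeltas : List (Int × Int) :=
  [(1, 2), (2, 1), (2, -1), (1, -2), (-1, -2), (-2, -1), (-2, 1), (-1, 2)]

-- inner 'for dist in range(1, 8)' loop: returns (early-return value, final plane counter)
def pvDistLoop (df dr f r : Int) : List Int → Int → Option Int × Int
  | [], plane => (none, plane)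
  | d :: ds, plane =>
      if df = f * d ∧ dr = r * d then (some plane, plane)
      else pvDistLoop df dr f r ds (plane + 1)

-- outer 'for dir_file, dir_rank in QUEEN_DIRS' loop
def pvDirLoop (df dr : Int) : List (Int × Int) → Int → Option Int
  | [], _ => none
  | (f, r) :: rest, plane =>
      match pvDistLoop df dr f r (PySem.List.pyRange 1 8 1) plane with
      | (some p, _) => some p
      | (none, plane') => pvDirLoop df dr rest plane'

-- 'for offset, (dir_file, dir_rank) in enumerate(KNIGHT_DELTAS)'
def pvKnightLoop (df dr : Int) : List (Int × (Int × Int)) → Option Int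
  | [] => none
  | (off, (f, r)) :: rest =>
      if df = f ∧ dr = r then some (56 + off) else pvKnightLoop df dr rest

def spec_plane_for_delta_py (df : Int) (dr : Int) : Int :=
  match pvDirLoop df dr pvQueenDirs 0 with
  | some p => p
  | none =>
      match pvKnightLoop df dr (PySem.List.enumerate pvKnightDeltas) with
      | some p => p
      | none => 0  -- Python raises AssertionError here; these inputs are outside Pre_

-- ===== PORT B =====
def pvSign (x : Int) : Int := (if x > 0 then (1 : Int) else 0) - (if x < 0 then (1 : Int) else 0)

def pvQueenIndex : PySem.Dict (Int × Int) Int :=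
  (PySem.List.enumerate pvQueenDirs).foldl (fun d p => d.insert p.2 p.1) PySem.Dict.empty

def pvKnightIndex : PySem.Dict (Int × Int) Int :=
  (PySem.List.enumerate pvKnightDeltas).foldl (fun d p => d.insert p.2 p.1) PySem.Dict.empty

def pvKnightResult (df dr : Int) : Int :=
  match pvKnightIndex.get? (df, dr) with
  | some ki => 56 + ki
  | none => 0  -- B raises AssertionError here; outside Pre_

def spec_plane_for_delta_py_alt (df : Int) (dr : Int) : Int :=
  let sx := pvSign df
  let sy := pvSign dr
  let dist : Int := max |df| |dr|
  match pvQueenIndex.get? (sx, sy) with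
  | some qi =>
      if 1 ≤ dist ∧ dist ≤ 7 ∧ df = sx * dist ∧ dr = sy * dist then qi * 7 + (dist - 1)
      else pvKnightResult df dr
  | none => pvKnightResult df dr

-- ===== PRECONDITION & SPEC =====
-- Pre_ excludes exactly the inputs where A raises AssertionError ("unencodable delta"):
-- neither a knight delta nor a queen-aligned delta of distance 1..7; B raises there too.
def Pre_spec_plane_for_delta_py (df : Int) (dr : Int) : Prop :=
  (df, dr) ∈ ([(1, 2), (2, 1), (2, -1), (1, -2), (-1, -2), (-2, -1), (-2, 1), (-1, 2)] : List (Int × Int)) ∨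
  (¬(df = 0 ∧ dr = 0) ∧ (df = 0 ∨ dr = 0 ∨ |df| = |dr|) ∧ |df| ≤ 7 ∧ |dr| ≤ 7)
instance (df : Int) (dr : Int) : Decidable (Pre_spec_plane_for_delta_py df dr) := by
  unfold Pre_spec_plane_for_delta_py; infer_instance

def pvWitness_spec_plane_for_delta_py : Int × Int := (0, 1)

def Spec_spec_plane_for_delta_py (df : Int) (dr : Int) (out : Int) : Prop := out = spec_plane_for_delta_py_alt df dr
instance (df : Int) (dr : Int) (out : Int) : Decidable (Spec_spec_plane_for_delta_py df dr out) := by unfold Spec_spec_plane_for_delta_py; infer_instance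

-- ===== CLAIM (what is proved, stated in full; the proofs are below) =====
def Claim_equal_spec_plane_for_delta_py : Prop := ∀ (df : Int) (dr : Int), Dom_spec_plane_for_delta_py df dr → Pre_spec_plane_for_delta_py df dr → Spec_spec_plane_for_delta_py df dr (spec_plane_for_delta_py df dr)

-- ===== LEMMAS AND PROOFS =====
lemma pv_pre_bounds (df dr : Int) (h : Pre_spec_plane_for_delta_py df dr) :
    -7 ≤ df ∧ df ≤ 7 ∧ -7 ≤ dr ∧ dr ≤ 7 := by
  rcases h with h | ⟨_, _, h1, h2⟩
  · fin_cases h <;> norm_num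
  · rw [abs_le] at h1 h2; omega

-- ===== VERDICT (by name: the statement is the Claim_ definition above) =====
theorem spec_plane_for_delta_py_spec : Claim_equal_spec_plane_for_delta_py := by
  intro df dr _ hpre
  obtain ⟨h1, h2, h3, h4⟩ := pv_pre_bounds df dr hpre
  unfold Spec_spec_plane_for_delta_py
  revert hpre
  interval_cases df <;> interval_cases dr <;> decide
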